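-- pv_equiv track=rewrite | github.com/jasunchen/agmonitor_backend | opt/utility/schedulerHelper.py | convertRangeToTimes
-- ===== SOURCE A (Python) =====
-- def convertIndexToTime(index): #0-96, 0 being 00:00, 96 being 24:00
-- 	if (index == 96):
-- 		return "11:59 PM"
--
-- 	hours = index // 4
-- 	minutes = (index % 4)*15
-- 	if minutes == 0:
-- 		minutes = "00"
--
-- 	time = "AM"
-- 	if hours >= 12:
-- 		hours -= 12
-- 		time = "PM"
--
-- 	if hours == 0:
-- 		hours = 12
--
-- 	return "{}:{} {}".format(hours, minutes, time)
--
-- def convertRangeToTimes(arr):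
-- 	length = len(arr)
-- 	output = ""
-- 	for index, ele in enumerate(arr):
-- 		if (ele[0] == ele[1]):
-- 			output += convertIndexToTime(ele[0])
-- 		else:
-- 			output += convertIndexToTime(ele[0]) + " to " + convertIndexToTime(ele[1])
--
-- 		if (index == length - 2):
-- 			output += ", and "
-- 		else:
-- 			output += ", "
--
-- 	return output[:-2]
-- ===== SOURCE B (Python) =====
-- def convertIndexToTime(index): #0-96, 0 being 00:00, 96 being 24:00
-- 	if (index == 96):
-- 		return "11:59 PM"
--
-- 	hours = index // 4
-- 	minutes = (index % 4)*15
-- 	if minutes == 0: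
-- 		minutes = "00"
--
-- 	time = "AM"
-- 	if hours >= 12:
-- 		hours -= 12
-- 		time = "PM"
--
-- 	if hours == 0:
-- 		hours = 12
--
-- 	return "{}:{} {}".format(hours, minutes, time)
--
-- def convertRangeToTimes(arr):
-- 	# recursion on the list structure: the separator before the rest is decided
-- 	# by how many elements remain, so no trailing separator is ever produced
-- 	if not arr:
-- 		return ""
-- 	a, b = arr[0]
-- 	piece = convertIndexToTime(a) if a == b else convertIndexToTime(a) + " to " + convertIndexToTime(b)
-- 	rest = arr[1:]
-- 	if not rest:
-- 		return piece
-- 	sep = ", and " if len(rest) == 1 else ", "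
-- 	return piece + sep + convertRangeToTimes(rest)
-- ===== Notes on version B (the rewrite author's own statement) =====
-- stated objective: simpler
-- what changed: B replaces A's indexed loop (enumerate, append a separator after every element, compare index to length-2, strip the last two characters with [:-2]) by structural recursion on the list: the separator in front of the remaining elements is chosen from how many remain, so no trailing separator is ever produced and nothing is stripped.
import Mathlib
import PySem

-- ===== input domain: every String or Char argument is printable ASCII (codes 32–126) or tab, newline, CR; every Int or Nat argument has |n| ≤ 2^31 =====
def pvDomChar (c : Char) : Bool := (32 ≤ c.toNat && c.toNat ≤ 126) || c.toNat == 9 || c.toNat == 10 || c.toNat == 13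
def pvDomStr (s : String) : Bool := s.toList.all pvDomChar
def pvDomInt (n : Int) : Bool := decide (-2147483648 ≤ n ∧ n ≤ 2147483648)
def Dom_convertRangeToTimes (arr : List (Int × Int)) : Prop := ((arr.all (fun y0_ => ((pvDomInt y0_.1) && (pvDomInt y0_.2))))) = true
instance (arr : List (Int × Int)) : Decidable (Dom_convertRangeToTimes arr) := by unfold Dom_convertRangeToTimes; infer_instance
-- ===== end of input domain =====

-- B assembles the result by structural recursion (separator chosen from how many
-- elements remain) instead of A's enumerate-append-separator-then-strip loop.

-- shared helper: Python's convertIndexToTime (identical in both sources), on List Char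
def convertIndexToTime (index : Int) : List Char :=
  if index = 96 then "11:59 PM".toList
  else
    let hours := PySem.Int.floordiv index 4
    let minutes := (PySem.Int.mod index 4) * 15
    let minutesS : List Char := if minutes = 0 then "00".toList else PySem.Int.toChars minutes
    let ht : Int × List Char := if hours ≥ 12 then (hours - 12, "PM".toList) else (hours, "AM".toList)
    let hours' : Int := if ht.1 = 0 then 12 else ht.1
    PySem.Int.toChars hours' ++ ":".toList ++ minutesS ++ " ".toList ++ ht.2

-- ===== PORT A =====
def convertRangeToTimes (arr : List (Int × Int)) : String :=
  let length : Int := arr.length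
  let output : List Char :=
    (PySem.List.enumerate arr).foldl (fun output p =>
      let output := if p.2.1 = p.2.2 then output ++ convertIndexToTime p.2.1
        else output ++ convertIndexToTime p.2.1 ++ " to ".toList ++ convertIndexToTime p.2.2
      if p.1 = length - 2 then output ++ ", and ".toList else output ++ ", ".toList) []
  String.ofList (PySem.List.slice output none (some (-2)))

-- ===== PORT B =====
-- Source B's recursion, on List Char (Python's string concatenation = list append here)
def convertRangeToTimesChars : List (Int × Int) → List Char
  | [] => []
  | p :: rest =>
      let piece : List Char :=
        if p.1 = p.2 then convertIndexToTime p.1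
        else convertIndexToTime p.1 ++ " to ".toList ++ convertIndexToTime p.2
      match rest with
      | [] => piece
      | [_] => piece ++ ", and ".toList ++ convertRangeToTimesChars rest
      | _ => piece ++ ", ".toList ++ convertRangeToTimesChars rest

def convertRangeToTimes_alt (arr : List (Int × Int)) : String :=
  String.ofList (convertRangeToTimesChars arr)

-- ===== PRECONDITION & SPEC =====
def Spec_convertRangeToTimes (arr : List (Int × Int)) (out : String) : Prop := out = convertRangeToTimes_alt arr
instance (arr : List (Int × Int)) (out : String) : Decidable (Spec_convertRangeToTimes arr out) := by unfold Spec_convertRangeToTimes; infer_instance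

-- ===== CLAIM (what is proved, stated in full; the proofs are below) =====
def Claim_equal_convertRangeToTimes : Prop := ∀ (arr : List (Int × Int)), Dom_convertRangeToTimes arr → Spec_convertRangeToTimes arr (convertRangeToTimes arr)

-- ===== LEMMAS AND PROOFS =====

lemma foldlA_append (l : List (Int × (Int × Int))) (L : Int) (acc : List Char) :
    l.foldl (fun output p =>
      let output := if p.2.1 = p.2.2 then output ++ convertIndexToTime p.2.1
        else output ++ convertIndexToTime p.2.1 ++ " to ".toList ++ convertIndexToTime p.2.2
      if p.1 = L - 2 then output ++ ", and ".toList else output ++ ", ".toList) acc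
    = acc ++ l.foldl (fun output p =>
      let output := if p.2.1 = p.2.2 then output ++ convertIndexToTime p.2.1
        else output ++ convertIndexToTime p.2.1 ++ " to ".toList ++ convertIndexToTime p.2.2
      if p.1 = L - 2 then output ++ ", and ".toList else output ++ ", ".toList) [] := by
  induction l generalizing acc with
  | nil => simp
  | cons p l ih =>
      simp only [List.foldl_cons]
      rw [ih, ih (if p.1 = L - 2 then _ else _)]
      split_ifs <;> simp [List.append_assoc]

-- A's loop over a tail of the enumeration equals B's recursion plus one trailing ", "
lemma foldlA_eq (arr : List (Int × Int)) (s L : Int) (h : L - s = arr.length) :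
    (PySem.List.enumerate arr s).foldl (fun output p =>
      let output := if p.2.1 = p.2.2 then output ++ convertIndexToTime p.2.1
        else output ++ convertIndexToTime p.2.1 ++ " to ".toList ++ convertIndexToTime p.2.2
      if p.1 = L - 2 then output ++ ", and ".toList else output ++ ", ".toList) []
    = convertRangeToTimesChars arr ++ (if arr = [] then [] else ", ".toList) := by
  induction arr generalizing s with
  | nil => simp [PySem.List.enumerate_nil, convertRangeToTimesChars]
  | cons p rest ih =>
      rw [PySem.List.enumerate_cons, List.foldl_cons, foldlA_append]
      rw [ih (s + 1) (by simp at h ⊢; omega)]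
      match rest with
      | [] =>
          have hs : ¬ (s = L - 2) := by simp at h; omega
          simp only [convertRangeToTimesChars]
          rw [if_neg hs]
          split_ifs <;> simp_all [List.append_assoc]
      | [q] =>
          have hs : s = L - 2 := by simp at h; omega
          simp only [convertRangeToTimesChars]
          rw [if_pos hs]
          split_ifs <;> simp_all [List.append_assoc]
      | q :: r :: t =>
          have hs : ¬ (s = L - 2) := by simp at h; omega
          simp only [convertRangeToTimesChars]
          rw [if_neg hs]
          split_ifs <;> simp_all [List.append_assoc]

lemma take_append_left {α : Type} (xs ys : List α) : (xs ++ ys).take xs.length = xs := by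
  simp

-- ===== VERDICT (by name: the statement is the Claim_ definition above) =====
theorem convertRangeToTimes_spec : Claim_equal_convertRangeToTimes := by
  intro arr _
  show convertRangeToTimes arr = convertRangeToTimes_alt arr
  have hA : convertRangeToTimes arr
      = String.ofList (PySem.List.slice
          ((PySem.List.enumerate arr 0).foldl (fun output p =>
            let output := if p.2.1 = p.2.2 then output ++ convertIndexToTime p.2.1
              else output ++ convertIndexToTime p.2.1 ++ " to ".toList ++ convertIndexToTime p.2.2
            if p.1 = (arr.length : Int) - 2 then output ++ ", and ".toList else output ++ ", ".toList) [])
          none (some (-2))) := rfl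
  rw [hA, foldlA_eq arr 0 arr.length (by simp)]
  unfold convertRangeToTimes_alt
  match arr with
  | [] => rfl
  | p :: t =>
      rw [if_neg (by simp)]
      rw [PySem.List.slice_to_neg_ofNat _ 2 (by omega)]
      have h1 : (convertRangeToTimesChars (p :: t) ++ ", ".toList).length - 2
          = (convertRangeToTimesChars (p :: t)).length := by
        simp [List.length_append]
      rw [h1, take_append_left]
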